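-- pv_equiv track=rewrite | github.com/Park-Young-Hun/Algorithm | Python/Test/toss/test_5.py | solution
-- ===== SOURCE A (Python) =====
-- def solution(tasks):
--     answer = 0
--     tasks.sort()
--     target = [tasks[0]]
--     for i in range(1, len(tasks)):
--         if target[-1] == tasks[i]:
--             target.append(tasks[i])
--         else:
--             while target:
--                 n = len(target)
--                 if n >= 3 and (n-3)!= 1:
--                     for _ in range(3):
--                         target.pop()
--                     answer += 1
--                 elif n % 2 == 0:
--                     for _ in range(2):
--                         target.pop()
--                     answer += 1
--                 else:
--                     return -1
--             target = [tasks[i]]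
--     while target:
--         n = len(target)
--         if n >= 3 and (n-3)!= 1:
--             for _ in range(3):
--                 target.pop()
--             answer += 1
--         elif n % 2 == 0:
--             for _ in range(2):
--                 target.pop()
--             answer += 1
--         else:
--             return -1
--     return answer
-- ===== SOURCE B (Python) =====
-- def solution(tasks):
--     # Count multiplicities in a hash map and score each distinct value with a
--     # closed-form ceil(c/3); tasks.sort() is kept only to reproduce A's in-place
--     # mutation of the argument.
--     tasks.sort()
--     counts = {}
--     for t in tasks:
--         counts[t] = counts.get(t, 0) + 1
--     total = 0
--     for c in counts.values():
--         if c == 1: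
--             return -1
--         total += (c + 2) // 3
--     return total
-- ===== Notes on version B (the rewrite author's own statement) =====
-- stated objective: simpler
-- what changed: A simulates each group of equal tasks with a list it repeatedly pops 3 or 2 elements from; B counts multiplicities in one dict pass and scores each distinct value with the closed form (c+2)//3 (returning -1 for a value occurring exactly once), with no group list and no inner while loop.
import Mathlib
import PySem

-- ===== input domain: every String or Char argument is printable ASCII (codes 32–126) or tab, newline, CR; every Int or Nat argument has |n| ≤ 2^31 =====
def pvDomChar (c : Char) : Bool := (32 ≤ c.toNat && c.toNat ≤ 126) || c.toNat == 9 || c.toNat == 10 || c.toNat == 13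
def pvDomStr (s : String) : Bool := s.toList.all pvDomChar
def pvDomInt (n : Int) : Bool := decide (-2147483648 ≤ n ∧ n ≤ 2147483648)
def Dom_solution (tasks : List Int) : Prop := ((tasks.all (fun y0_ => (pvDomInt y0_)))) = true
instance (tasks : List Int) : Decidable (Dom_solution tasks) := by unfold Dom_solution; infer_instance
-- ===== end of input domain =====

-- B replaces A's pop-three/pop-two simulation of each group by a hash-map count and a
-- closed-form score per distinct value (objective: simpler). Both A and B sort `tasks`
-- in place; the equivalence proved here is about the return value.

-- ===== PORT A =====
-- the inner `while target:` loop (pop 3, pop 2, or return -1); `none` = the Python `return -1`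
def drainA : List Int → Int → Option Int
  | [], answer => some answer
  | x :: rest, answer =>
    if (x :: rest).length ≥ 3 ∧ (x :: rest).length - 3 ≠ 1 then
      drainA (x :: rest).dropLast.dropLast.dropLast (answer + 1)
    else if (x :: rest).length % 2 = 0 then
      drainA (x :: rest).dropLast.dropLast (answer + 1)
    else none
termination_by tg _ => tg.length
decreasing_by all_goals (simp only [List.length_dropLast, List.length_cons]; omega)

-- the `for i in range(1, len(tasks))` loop over the tail of the sorted list
def loopA : List Int → List Int → Int → Int
  | [], target, answer =>
    match drainA target answer with
    | some a => a
    | none => -1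
  | t :: rest, target, answer =>
    if target.getLast? = some t then loopA rest (target ++ [t]) answer
    else
      match drainA target answer with
      | none => -1
      | some a => loopA rest [t] a

def solution (tasks : List Int) : Int :=
  match PySem.List.sorted tasks (fun x => x) with
  | [] => 0          -- Python raises IndexError at tasks[0]; excluded by Pre_solution
  | h :: t => loopA t [h] 0

-- ===== PORT B =====
-- the `for c in counts.values()` loop: -1 on a singleton, else add (c+2)//3
def scoreB : List Int → Int → Int
  | [], total => total
  | c :: rest, total =>
    if c = 1 then -1 else scoreB rest (total + PySem.Int.floordiv (c + 2) 3)

def solution_alt (tasks : List Int) : Int :=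
  scoreB ((PySem.List.sorted tasks (fun x => x)).foldl
    (fun d t => d.insert t (d.getD t 0 + 1)) PySem.Dict.empty).values 0

-- ===== PRECONDITION & SPEC =====
-- Pre_ excludes only the empty list, on which A raises IndexError at tasks[0].
def Pre_solution (tasks : List Int) : Prop := tasks ≠ []
instance (tasks : List Int) : Decidable (Pre_solution tasks) := by unfold Pre_solution; infer_instance
def pvWitness_solution : List Int := [3, 3, 2, 2, 2]

def Spec_solution (tasks : List Int) (out : Int) : Prop := out = solution_alt tasks
instance (tasks : List Int) (out : Int) : Decidable (Spec_solution tasks out) := by unfold Spec_solution; infer_instance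

-- ===== CLAIM (what is proved, stated in full; the proofs are below) =====
def Claim_equal_solution : Prop := ∀ (tasks : List Int), Dom_solution tasks → Pre_solution tasks → Spec_solution tasks (solution tasks)

-- ===== LEMMAS AND PROOFS =====

-- run lengths of consecutive equal values, current value k seen c times so far
def runsAux (k : Int) (c : Nat) : List Int → List Nat
  | [] => [c]
  | t :: rest => if t = k then runsAux k (c + 1) rest else c :: runsAux t 1 rest

-- scoring a list of run lengths: -1 on a singleton run, else add ⌈c/3⌉
def score : List Nat → Int → Int
  | [], acc => acc
  | c :: rest, acc => if c = 1 then -1 else score rest (acc + (((c + 2) / 3 : Nat) : Int))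

lemma drainA_eq (n : Nat) : ∀ (tg : List Int), tg.length ≤ n → ∀ (a : Int),
    drainA tg a = if tg.length = 0 then some a
      else if tg.length = 1 then none
      else some (a + (((tg.length + 2) / 3 : Nat) : Int)) := by
  induction n with
  | zero =>
    intro tg h a
    have : tg = [] := List.length_eq_zero_iff.mp (Nat.le_zero.mp h)
    subst this; simp [drainA]
  | succ n ih =>
    intro tg h a
    match tg with
    | [] => simp [drainA]
    | x :: rest =>
      have hl : 0 < (x :: rest).length := by simp
      rw [drainA]
      by_cases h1 : (x :: rest).length ≥ 3 ∧ (x :: rest).length - 3 ≠ 1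
      · rw [if_pos h1, ih _ (by simp only [List.length_dropLast, List.length_cons] at *; omega) (a + 1)]
        simp only [List.length_dropLast]
        split_ifs <;> first | rfl | (exfalso; omega) | (congr 1; omega)
      · rw [if_neg h1]
        by_cases h2 : (x :: rest).length % 2 = 0
        · rw [if_pos h2, ih _ (by simp only [List.length_dropLast, List.length_cons] at *; omega) (a + 1)]
          simp only [List.length_dropLast]
          split_ifs <;> first | rfl | (exfalso; omega) | (congr 1; omega)
        · rw [if_neg h2]
          split_ifs <;> first | rfl | (exfalso; omega)

lemma loopA_eq : ∀ (rest tg : List Int) (k : Int) (a : Int), tg ≠ [] → tg.getLast? = some k →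
    loopA rest tg a = score (runsAux k tg.length rest) a := by
  intro rest
  induction rest with
  | nil =>
    intro tg k a hne hlast
    have hl : 0 < tg.length := List.length_pos_iff.mpr hne
    rw [loopA, drainA_eq tg.length tg le_rfl a, runsAux]
    by_cases h1 : tg.length = 1
    · simp [h1, score]
    · simp only [if_neg (by omega : ¬ tg.length = 0), if_neg h1]
      rw [score]
      simp [h1, score]
  | cons t rest ih =>
    intro tg k a hne hlast
    rw [loopA, runsAux]
    by_cases heq : t = k
    · subst heq
      rw [if_pos hlast, if_pos rfl]
      rw [ih (tg ++ [t]) t a (by simp) (by simp)]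
      simp
    · have hcond : ¬ (tg.getLast? = some t) := by
        rw [hlast]; simp [Ne.symm heq]
      rw [if_neg hcond, if_neg heq]
      have hl : 0 < tg.length := List.length_pos_iff.mpr hne
      rw [drainA_eq tg.length tg le_rfl a]
      by_cases h1 : tg.length = 1
      · simp [h1, score]
      · simp only [if_neg (by omega : ¬ tg.length = 0), if_neg h1]
        rw [score, if_neg h1, ih [t] t _ (by simp) (by simp)]
        simp

lemma discard_of_not_mem {l : List Int} {k : Int} (h : k ∉ l) : PySem.Set.discard l k = l := by
  unfold PySem.Set.discard
  apply List.filter_eq_self.mpr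
  intro y hy
  simp only [ne_eq, beq_eq_false_iff_ne, Bool.not_eq_eq_eq_not, Bool.not_true]
  exact fun hyk => h (hyk ▸ hy)

lemma runs_struct : ∀ (t : List Int) (k : Int), (k :: t).Pairwise (· ≤ ·) → ∀ (c : Nat),
    runsAux k c t
      = (c + t.count k) :: ((PySem.Set.ofList t).discard k).map (fun v => t.count v) := by
  intro t
  induction t with
  | nil => intro k _ c; simp [runsAux, PySem.Set.discard]
  | cons x t ih =>
    intro k hpw c
    have hpx : (x :: t).Pairwise (· ≤ ·) := hpw.tail
    have hkx : k ≤ x := (List.pairwise_cons.mp hpw).1 x (by simp)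
    have hxt : ∀ y ∈ t, x ≤ y := fun y hy => (List.pairwise_cons.mp hpx).1 y hy
    rw [runsAux]
    by_cases heq : x = k
    · subst heq
      rw [if_pos rfl, ih x hpx (c + 1), PySem.Set.ofList_cons]
      have hdd : PySem.Set.discard (x :: PySem.Set.discard (PySem.Set.ofList t) x) x
          = PySem.Set.discard (PySem.Set.ofList t) x := by
        unfold PySem.Set.discard
        simp [List.filter_filter]
      rw [hdd]
      congr 1
      · simp [List.count_cons_self]; omega
      · apply List.map_congr_left
        intro v hv
        have hvk : v ≠ x := ((PySem.Set.mem_discard _ _ _).mp hv).2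
        rw [List.count_cons_of_ne (Ne.symm hvk)]
    · rw [if_neg heq, ih x hpx 1, PySem.Set.ofList_cons]
      have hknm : k ∉ x :: t := by
        intro hm
        rcases List.mem_cons.mp hm with h | h
        · exact heq h.symm
        · exact heq (le_antisymm (hxt k h) hkx)
      have hknm2 : k ∉ x :: PySem.Set.discard (PySem.Set.ofList t) x := by
        intro hm
        rcases List.mem_cons.mp hm with h | h
        · exact heq h.symm
        · exact hknm (List.mem_cons_of_mem x ((PySem.Set.mem_ofList t k).mp ((PySem.Set.mem_discard _ _ _).mp h).1))
      rw [discard_of_not_mem hknm2]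
      have hc0 : (x :: t).count k = 0 := List.count_eq_zero.mpr hknm
      rw [List.map_cons]
      congr 1
      · omega
      congr 1
      · simp [List.count_cons_self]; omega
      · apply List.map_congr_left
        intro v hv
        have hvk : v ≠ x := ((PySem.Set.mem_discard _ _ _).mp hv).2
        rw [List.count_cons_of_ne (Ne.symm hvk)]

lemma score_scoreB : ∀ (cs : List Nat) (a : Int),
    scoreB (List.map (fun n : Nat => (n : Int)) cs) a = score cs a := by
  intro cs
  induction cs with
  | nil => intro a; simp [score, scoreB]
  | cons c rest ih =>
    intro a
    rw [List.map_cons, scoreB, score]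
    have h1 : ((c : Int) = 1) ↔ (c = 1) := by omega
    have h2 : PySem.Int.floordiv ((c : Int) + 2) 3 = (((c + 2) / 3 : Nat) : Int) := by
      exact_mod_cast PySem.Int.floordiv_natCast (c + 2) 3
    by_cases hc : c = 1
    · simp [hc]
    · rw [if_neg (by omega : ¬ ((c : Int) = 1)), if_neg hc, h2, ih]

lemma values_counter (s : List Int) :
    (PySem.Dict.counter s).values = (PySem.Set.ofList s).map (fun v => ((s.count v : Nat) : Int)) := by
  show (PySem.Dict.counter s).items.map Prod.snd = _
  rw [PySem.Dict.items_counter, List.map_map]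
  rfl

-- ===== VERDICT (by name: the statement is the Claim_ definition above) =====
theorem solution_spec : Claim_equal_solution := by
  unfold Claim_equal_solution
  intro tasks _ hpre
  obtain ⟨h, t, hm⟩ : ∃ h t, PySem.List.sorted tasks (fun x => x) = h :: t := by
    cases hsl : PySem.List.sorted tasks (fun x => x) with
    | nil => exact absurd ((PySem.List.sorted_eq_nil_iff tasks (fun x => x) false).mp hsl) hpre
    | cons h t => exact ⟨h, t, rfl⟩
  have hpw : (h :: t).Pairwise (· ≤ ·) := by
    have := PySem.List.sorted_pairwise tasks (fun x => x)
    rw [hm] at this; exact this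
  unfold Spec_solution solution solution_alt
  rw [hm, PySem.Dict.foldl_insert_getD_add_one_eq_counter, values_counter]
  simp only []
  rw [loopA_eq t [h] h 0 (by simp) (by simp), PySem.Set.ofList_cons]
  have hrs : runsAux h ([h] : List Int).length t
      = (1 + t.count h) :: ((PySem.Set.ofList t).discard h).map (fun v => t.count v) :=
    runs_struct t h hpw 1
  rw [hrs, ← score_scoreB]
  congr 1
  rw [List.map_cons, List.map_cons, List.map_map]
  congr 1
  · simp [List.count_cons_self]; omega
  · apply List.map_congr_left
    intro v hv
    have hvk : v ≠ h := ((PySem.Set.mem_discard _ _ _).mp hv).2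
    simp [List.count_cons_of_ne (Ne.symm hvk)]
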